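-- pv_equiv track=rewrite | github.com/Vijay1234-coder/data_structure_plmsolving | ARRAY/Countofdistinctelements.py | solve
-- ===== SOURCE A (Python) =====
-- def solve(arr1,arr2):
--     count =0
--     dic = {}
--     for x in arr1:
--         if x not in dic:
--             dic[x] =1
--     for num in arr2:
--         if num in dic:
--             dic[num]-=1
--             if dic[num]==0:
--                 count+=1
--     return count
-- ===== SOURCE B (Python) =====
-- def solve(arr1, arr2):
--     a = sorted(arr1)
--     b = sorted(arr2)
--     i = j = 0
--     count = 0
--     n, m = len(a), len(b)
--     while i < n and j < m:
--         if a[i] < b[j]: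
--             i += 1
--         elif b[j] < a[i]:
--             j += 1
--         else:
--             count += 1
--             v = a[i]
--             while i < n and a[i] == v:
--                 i += 1
--             while j < m and b[j] == v:
--                 j += 1
--     return count
-- ===== Notes on version B (the rewrite author's own statement) =====
-- stated objective: alternative
-- what changed: Replaces the dict build plus decrement/zero-check counting loop by sort-then-two-pointer merge: both arrays are sorted and a single merge scan counts each common value once, skipping duplicate runs; no dict, no counter decrements.
import Mathlib
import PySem

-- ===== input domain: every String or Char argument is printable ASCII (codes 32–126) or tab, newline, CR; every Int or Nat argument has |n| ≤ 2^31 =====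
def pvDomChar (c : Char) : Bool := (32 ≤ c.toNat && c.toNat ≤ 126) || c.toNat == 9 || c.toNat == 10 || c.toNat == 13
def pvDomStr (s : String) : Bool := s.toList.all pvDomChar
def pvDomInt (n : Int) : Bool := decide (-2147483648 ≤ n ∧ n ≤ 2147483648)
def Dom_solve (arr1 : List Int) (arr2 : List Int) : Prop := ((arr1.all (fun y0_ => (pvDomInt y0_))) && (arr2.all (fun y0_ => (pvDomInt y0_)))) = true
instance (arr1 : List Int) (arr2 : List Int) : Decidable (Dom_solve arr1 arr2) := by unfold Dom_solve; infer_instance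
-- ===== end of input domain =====

-- B replaces A's dict build + decrement/zero-check counting loop by sort-then-two-pointer merge (same values; alternative algorithm, not claimed faster).

-- ===== PORT A =====
-- second loop's body: 'if num in dic: dic[num] -= 1; if dic[num] == 0: count += 1'
-- (dic[num] is read with getD under the 'contains' guard, where Python's KeyError cannot fire)
def solveStep (s : PySem.Dict Int Int × Int) (num : Int) : PySem.Dict Int Int × Int :=
  if s.1.contains num then
    let v := s.1.getD num 0 - 1
    (s.1.insert num v, if v = 0 then s.2 + 1 else s.2)
  else s

def solve (arr1 : List Int) (arr2 : List Int) : Int :=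
  let dic := arr1.foldl (fun d x => if d.contains x then d else d.insert x 1)
      (PySem.Dict.empty : PySem.Dict Int Int)
  (arr2.foldl solveStep (dic, 0)).2

-- ===== PORT B =====
-- the two-pointer while loop of Source B as recursion on the (sorted) suffixes at the two indices;
-- the inner 'while a[i]==v' / 'while b[j]==v' skips are dropWhile on the suffixes (exact)
def mergeCount : List Int → List Int → Int
  | [], _ => 0
  | _ :: _, [] => 0
  | x :: xs, y :: ys =>
    if x < y then mergeCount xs (y :: ys)
    else if y < x then mergeCount (x :: xs) ys
    else 1 + mergeCount (xs.dropWhile (fun a => a == x)) (ys.dropWhile (fun a => a == x))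
termination_by xs ys => xs.length + ys.length
decreasing_by
  · simp
  · simp
  · have h1 := List.length_dropWhile_le (fun a => a == x) xs
    have h2 := List.length_dropWhile_le (fun a => a == x) ys
    simp; omega

def solve_alt (arr1 : List Int) (arr2 : List Int) : Int :=
  mergeCount (PySem.List.sorted arr1 (fun z => z) false) (PySem.List.sorted arr2 (fun z => z) false)

-- ===== PRECONDITION & SPEC =====
def Spec_solve (arr1 : List Int) (arr2 : List Int) (out : Int) : Prop := out = solve_alt arr1 arr2
instance (arr1 : List Int) (arr2 : List Int) (out : Int) : Decidable (Spec_solve arr1 arr2 out) := by unfold Spec_solve; infer_instance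

-- ===== CLAIM (what is proved, stated in full; the proofs are below) =====
def Claim_equal_solve : Prop := ∀ (arr1 : List Int) (arr2 : List Int), Dom_solve arr1 arr2 → Spec_solve arr1 arr2 (solve arr1 arr2)

-- ===== LEMMAS AND PROOFS =====

-- the first loop of A: get? is 'some 1' exactly on the elements of (seen ++ l)
lemma build_get? (l : List Int) : ∀ (seen : List Int) (d : PySem.Dict Int Int),
    (∀ x, d.get? x = if x ∈ seen then some 1 else none) →
    ∀ x, (l.foldl (fun d x => if d.contains x then d else d.insert x 1) d).get? x
      = if x ∈ seen ++ l then some 1 else none := by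
  induction l with
  | nil => intro seen d h x; simpa using h x
  | cons a l ih =>
    intro seen d h x
    simp only [List.foldl_cons]
    by_cases ha : a ∈ seen
    · have hc : d.contains a = true := by
        rw [PySem.Dict.contains_eq_isSome_get?, h a, if_pos ha]; rfl
      rw [hc]
      simp only [if_true]
      have := ih (seen ++ [a]) d (by
        intro y
        by_cases hy : y ∈ seen ++ [a]
        · rcases List.mem_append.1 hy with hy' | hy'
          · rw [h y, if_pos hy', if_pos hy]
          · simp only [List.mem_singleton] at hy'
            subst hy'; rw [h y, if_pos ha, if_pos hy]
        · rw [h y, if_neg (fun hm => hy (List.mem_append_left _ hm)), if_neg hy]) x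
      rw [this]
      by_cases hx : x ∈ seen ++ a :: l
      · rw [if_pos, if_pos hx]
        rcases List.mem_append.1 hx with h1 | h1
        · exact List.mem_append_left _ (List.mem_append_left _ h1)
        · rcases List.mem_cons.1 h1 with h2 | h2
          · subst h2; exact List.mem_append_left _ (List.mem_append_right _ (by simp))
          · exact List.mem_append_right _ h2
      · rw [if_neg, if_neg hx]
        intro hmem
        rcases List.mem_append.1 hmem with h1 | h1
        · rcases List.mem_append.1 h1 with h2 | h2
          · exact hx (List.mem_append_left _ h2)
          · simp only [List.mem_singleton] at h2; subst h2
            exact hx (List.mem_append_right _ (List.mem_cons_self))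
        · exact hx (List.mem_append_right _ (List.mem_cons_of_mem _ h1))
    · have hc : d.contains a = false := by
        rw [PySem.Dict.contains_eq_isSome_get?, h a, if_neg ha]; rfl
      rw [hc]
      simp only [Bool.false_eq_true, if_false]
      have := ih (seen ++ [a]) (d.insert a 1) (by
        intro y
        rw [PySem.Dict.get?_insert]
        by_cases hy : y = a
        · subst hy; rw [if_pos rfl, if_pos (List.mem_append_right _ (by simp))]
        · rw [if_neg hy, h y]
          by_cases hs : y ∈ seen
          · rw [if_pos hs, if_pos (List.mem_append_left _ hs)]
          · rw [if_neg hs, if_neg]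
            intro hmem
            rcases List.mem_append.1 hmem with h1 | h1
            · exact hs h1
            · simp only [List.mem_singleton] at h1; exact hy h1) x
      rw [this]
      congr 1
      simp [List.mem_append, List.mem_cons]

-- count of x in seen ++ [a]
lemma count_append_singleton (seen : List Int) (a x : Int) :
    (seen ++ [a]).count x = seen.count x + (if x = a then 1 else 0) := by
  by_cases h : x = a
  · subst h; simp [List.count_append]
  · have h0 : List.count x [a] = 0 := List.count_eq_zero.2 (fun hm => h (by simpa using hm))
    rw [List.count_append, h0, if_neg h]

-- growing 'seen' by one element changes the filter length by the obvious amount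
lemma filter_len_append_singleton (l : List Int) (seen : List Int) (a : Int) (hl : l.Nodup) :
    (l.filter (fun x => decide (x ∈ seen ++ [a]))).length
      = (l.filter (fun x => decide (x ∈ seen))).length
        + (if a ∈ l ∧ a ∉ seen then 1 else 0) := by
  induction l with
  | nil => simp
  | cons b l ih =>
    rcases List.nodup_cons.1 hl with ⟨hb, hl'⟩
    have ihl := ih hl'
    rw [List.filter_cons, List.filter_cons]
    by_cases h1 : b ∈ seen ++ [a]
    · rw [if_pos (by simpa using h1)]
      by_cases h2 : b ∈ seen
      · rw [if_pos (by simpa using h2)]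
        have hiff : (a ∈ b :: l ∧ a ∉ seen) ↔ (a ∈ l ∧ a ∉ seen) := by
          constructor
          · rintro ⟨hal, has⟩
            rcases List.mem_cons.1 hal with h | h
            · exact absurd (h ▸ h2) has
            · exact ⟨h, has⟩
          · rintro ⟨hal, has⟩; exact ⟨List.mem_cons_of_mem _ hal, has⟩
        simp only [List.length_cons]
        rw [ihl, if_congr hiff rfl rfl]
        ring
      · have hba : b = a := by
          rcases List.mem_append.1 h1 with h | h
          · exact absurd h h2
          · simpa using h
        rw [if_neg (by simpa using h2)]
        subst hba
        simp only [List.length_cons]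
        rw [ihl, if_neg (fun h => hb h.1), if_pos ⟨List.mem_cons_self, h2⟩]
    · have hbs : b ∉ seen := fun h => h1 (List.mem_append_left _ h)
      have hba : b ≠ a := fun h => h1 (List.mem_append_right _ (by simp [h]))
      rw [if_neg (by simpa using h1), if_neg (by simpa using hbs), ihl]
      have hiff : (a ∈ b :: l ∧ a ∉ seen) ↔ (a ∈ l ∧ a ∉ seen) := by
        constructor
        · rintro ⟨hal, has⟩
          rcases List.mem_cons.1 hal with h | h
          · exact absurd h.symm hba
          · exact ⟨h, has⟩
        · rintro ⟨hal, has⟩; exact ⟨List.mem_cons_of_mem _ hal, has⟩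
      rw [if_congr hiff rfl rfl]

-- the second loop of A: invariant over the processed prefix 'seen'
lemma loop_inv (arr1 : List Int) (rest : List Int) : ∀ (seen : List Int) (d : PySem.Dict Int Int) (c : Int),
    (∀ x, d.contains x = decide (x ∈ arr1)) →
    (∀ x ∈ arr1, d.getD x 0 = 1 - seen.count x) →
    c = (((PySem.Set.ofList arr1).filter (fun x => decide (x ∈ seen))).length : Int) →
    (rest.foldl solveStep (d, c)).2
      = (((PySem.Set.ofList arr1).filter (fun x => decide (x ∈ seen ++ rest))).length : Int) := by
  induction rest with
  | nil => intro seen d c _ _ hc; simpa using hc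
  | cons a rest ih =>
    intro seen d c hcont hval hc
    simp only [List.foldl_cons]
    by_cases ha : a ∈ arr1
    · have hstep : solveStep (d, c) a
        = (d.insert a (d.getD a 0 - 1), if d.getD a 0 - 1 = 0 then c + 1 else c) := by
        simp [solveStep, hcont a, ha]
      rw [hstep]
      have hv : d.getD a 0 - 1 = -(seen.count a : Int) := by
        rw [hval a ha]; ring
      have hzero : (d.getD a 0 - 1 = 0) ↔ a ∉ seen := by
        rw [hv]
        constructor
        · intro h hmem
          have := List.count_pos_iff.2 hmem
          omega
        · intro h
          have : seen.count a = 0 := by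
            by_contra hne
            exact h (List.count_pos_iff.1 (Nat.pos_of_ne_zero hne))
          simp [this]
      have hsplit : seen ++ a :: rest = (seen ++ [a]) ++ rest := by simp
      rw [hsplit]
      apply ih (seen ++ [a])
      · intro x
        rw [PySem.Dict.contains_eq_isSome_get?, PySem.Dict.get?_insert]
        by_cases hx : x = a
        · subst hx; simp [ha]
        · rw [if_neg hx, ← PySem.Dict.contains_eq_isSome_get?, hcont x]
      · intro x hx
        rw [PySem.Dict.getD_insert]
        by_cases hxa : x = a
        · subst hxa
          rw [if_pos rfl, hv, count_append_singleton, if_pos rfl]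
          push_cast; ring
        · rw [if_neg hxa, hval x hx, count_append_singleton, if_neg hxa]
          simp
      · rw [filter_len_append_singleton _ _ _ (PySem.Set.nodup_ofList arr1)]
        by_cases hmem : a ∈ seen
        · rw [if_neg (fun h => (hzero.1 h) hmem), if_neg (fun h => h.2 hmem)]
          rw [hc]; simp
        · rw [if_pos (hzero.2 hmem), if_pos ⟨(PySem.Set.mem_ofList arr1 a).2 ha, hmem⟩]
          rw [hc]; push_cast; ring
    · have hstep : solveStep (d, c) a = (d, c) := by
        simp [solveStep, hcont a, ha]
      rw [hstep]
      have := ih (seen ++ [a]) d c hcont (by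
        intro x hx
        rw [hval x hx, count_append_singleton, if_neg (fun h => ha (by rw [← h]; exact hx))]
        simp) (by
        rw [hc, filter_len_append_singleton _ _ _ (PySem.Set.nodup_ofList arr1),
          if_neg (fun h => ha ((PySem.Set.mem_ofList arr1 a).1 h.1))]
        simp)
      rw [this]
      congr 3
      funext x
      simp [List.mem_append, List.mem_cons]

-- A computes the size of the intersection of the two toFinsets
lemma solve_eq_card (arr1 arr2 : List Int) :
    solve arr1 arr2 = ((arr1.toFinset ∩ arr2.toFinset).card : Int) := by
  unfold solve
  have hbuild := build_get? arr1 [] PySem.Dict.empty (by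
    intro x; simp [PySem.Dict.get?_empty])
  set dic := arr1.foldl (fun d x => if d.contains x then d else d.insert x 1)
      (PySem.Dict.empty : PySem.Dict Int Int) with hdic
  simp only [List.nil_append] at hbuild
  have hloop := loop_inv arr1 arr2 [] dic 0
    (by intro x; rw [PySem.Dict.contains_eq_isSome_get?, hbuild x]
        by_cases hx : x ∈ arr1 <;> simp [hx])
    (by intro x hx
        rw [PySem.Dict.getD_eq_get?_getD, hbuild x, if_pos hx]
        simp)
    (by simp)
  simp only [List.nil_append] at hloop
  rw [hloop]
  congr 1
  have hnd : ((PySem.Set.ofList arr1).filter (fun x => decide (x ∈ arr2))).Nodup :=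
    (PySem.Set.nodup_ofList arr1).filter _
  have hset : arr1.toFinset ∩ arr2.toFinset
      = ((PySem.Set.ofList arr1).filter (fun x => decide (x ∈ arr2))).toFinset := by
    ext a; simp [PySem.Set.mem_ofList]
  rw [hset, List.toFinset_card_of_nodup hnd]
  rfl

-- on a sorted list whose elements are all ≥ x, dropping the leading run of x is filtering out x
lemma dropWhile_eq_filter (x : Int) : ∀ (l : List Int), l.Pairwise (· ≤ ·) →
    (∀ a ∈ l, x ≤ a) → l.dropWhile (fun a => a == x) = l.filter (fun a => a ≠ x) := by
  intro l
  induction l with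
  | nil => intro _ _; simp
  | cons h t ih =>
    intro hp hge
    rcases List.pairwise_cons.1 hp with ⟨hht, ht⟩
    by_cases hx : h = x
    · subst hx
      rw [List.dropWhile_cons_of_pos (by simp), List.filter_cons_of_neg (by simp)]
      exact ih ht (fun a ha => hge a (List.mem_cons_of_mem _ ha))
    · have hlt : x < h := lt_of_le_of_ne (hge h List.mem_cons_self) (Ne.symm hx)
      rw [List.dropWhile_cons_of_neg (by simp [hx]), List.filter_cons_of_pos (by simp [hx])]
      rw [List.filter_eq_self.2]
      intro a ha
      have : x < a := lt_of_lt_of_le hlt (hht a ha)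
      simp; omega

-- the merge scan on two sorted lists counts the intersection of the toFinsets
lemma mergeCount_eq_card : ∀ (xs ys : List Int), xs.Pairwise (· ≤ ·) → ys.Pairwise (· ≤ ·) →
    mergeCount xs ys = ((xs.toFinset ∩ ys.toFinset).card : Int) := by
  intro xs ys
  induction hn : xs.length + ys.length using Nat.strong_induction_on generalizing xs ys with
  | _ n ih =>
  match xs, ys with
  | [], ys => intro _ _; simp [mergeCount]
  | x :: xs, [] => intro _ _; simp [mergeCount]
  | x :: xs, y :: ys =>
    intro hpx hpy
    rcases List.pairwise_cons.1 hpx with ⟨hx, hpx'⟩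
    rcases List.pairwise_cons.1 hpy with ⟨hy, hpy'⟩
    rw [mergeCount]
    by_cases hlt : x < y
    · rw [if_pos hlt]
      have hnotmem : x ∉ insert y ys.toFinset := by
        simp only [Finset.mem_insert, List.mem_toFinset]
        rintro (h | h)
        · omega
        · have := hy x h; omega
      rw [ih (xs.length + (y :: ys).length) (by subst hn; simp) xs (y :: ys) rfl hpx' hpy]
      congr 2
      simp only [List.toFinset_cons]
      exact (Finset.insert_inter_of_notMem hnotmem).symm
    · rw [if_neg hlt]
      by_cases hgt : y < x
      · rw [if_pos hgt]
        have hnotmem : y ∉ insert x xs.toFinset := by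
          simp only [Finset.mem_insert, List.mem_toFinset]
          rintro (h | h)
          · omega
          · have := hx y h; omega
        rw [ih ((x :: xs).length + ys.length) (by subst hn; simp) (x :: xs) ys rfl hpx hpy']
        congr 2
        simp only [List.toFinset_cons]
        exact (Finset.inter_insert_of_notMem hnotmem).symm
      · rw [if_neg hgt]
        have hxy : x = y := by omega
        subst hxy
        have hd1 := dropWhile_eq_filter x xs hpx' hx
        have hd2 := dropWhile_eq_filter x ys hpy' hy
        have hl1 := List.length_dropWhile_le (fun a => a == x) xs
        have hl2 := List.length_dropWhile_le (fun a => a == x) ys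
        rw [ih ((xs.dropWhile (fun a => a == x)).length + (ys.dropWhile (fun a => a == x)).length)
          (by subst hn; simp; omega) _ _ rfl
          (by rw [hd1]; exact hpx'.filter _)
          (by rw [hd2]; exact hpy'.filter _)]
        rw [hd1, hd2]
        have hfin1 : (xs.filter (fun a => a ≠ x)).toFinset = xs.toFinset.erase x := by
          ext a; simp [Finset.mem_erase, and_comm]
        have hfin2 : (ys.filter (fun a => a ≠ x)).toFinset = ys.toFinset.erase x := by
          ext a; simp [Finset.mem_erase, and_comm]
        rw [hfin1, hfin2]
        have hinter : (x :: xs).toFinset ∩ (x :: ys).toFinset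
            = insert x (xs.toFinset.erase x ∩ ys.toFinset.erase x) := by
          ext a
          simp only [List.toFinset_cons, Finset.mem_inter, Finset.mem_insert, Finset.mem_erase,
            List.mem_toFinset]
          by_cases hax : a = x
          · simp [hax]
          · simp [hax]
        rw [hinter, Finset.card_insert_of_notMem (by simp)]
        push_cast; ring

-- ===== VERDICT (by name: the statement is the Claim_ definition above) =====
theorem solve_spec : Claim_equal_solve := by
  intro arr1 arr2 _
  unfold Spec_solve solve_alt
  rw [solve_eq_card,
    mergeCount_eq_card _ _
      (by simpa using PySem.List.sorted_pairwise arr1 (fun z => z))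
      (by simpa using PySem.List.sorted_pairwise arr2 (fun z => z))]
  have h1 : (PySem.List.sorted arr1 (fun z => z) false).toFinset = arr1.toFinset := by
    ext a; simp [PySem.List.mem_sorted]
  have h2 : (PySem.List.sorted arr2 (fun z => z) false).toFinset = arr2.toFinset := by
    ext a; simp [PySem.List.mem_sorted]
  rw [h1, h2]
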